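-- pv_equiv track=rewrite | github.com/punchyouinthenuts/GOJI | Scripts/RAC/WEEKLIES/03COUNTS.py | consolidate_counts
-- ===== SOURCE A (Python) =====
-- def consolidate_counts(counts_dict):
--     """Consolidate version counts into predefined groups with standardized uppercase comparison."""
--     consolidated = {
--         'CBC2': 0,
--         'CBC3': 0,
--         'EXC': 0,
--         'INACTIVE A-PO': 0,
--         'INACTIVE A-PU': 0,
--         'INACTIVE AT-PO': 0,
--         'INACTIVE AT-PU': 0,
--         'NCWO 1-A': 0,
--         'NCWO 1-AP': 0,
--         'NCWO 2-A': 0,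
--         'NCWO 2-AP': 0,
--         'PREPIF': 0
--     }
--
--     for version, count in counts_dict.items():
--         version_upper = str(version).upper()
--         if version_upper.startswith('RAC2404-DM07'):
--             consolidated['CBC2'] += count
--         elif version_upper.startswith('RAC2401-DM03'):
--             consolidated['CBC3'] += count
--         elif 'RACXW' in version_upper:
--             consolidated['EXC'] += count
--         elif 'PPIF' in version_upper:
--             consolidated['PREPIF'] += count
--         elif '-A-PO' in version_upper or '-PR-PO' in version_upper:
--             consolidated['INACTIVE A-PO'] += count
--         elif '-A-PU' in version_upper or '-PR-PU' in version_upper: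
--             consolidated['INACTIVE A-PU'] += count
--         elif '-AT-PO' in version_upper:
--             consolidated['INACTIVE AT-PO'] += count
--         elif '-AT-PU' in version_upper:
--             consolidated['INACTIVE AT-PU'] += count
--         elif 'NCWO1-A' in version_upper or 'NCWO1-PR' in version_upper:
--             consolidated['NCWO 1-A'] += count
--         elif 'NCWO1-AP' in version_upper or 'NCWO1-APPR' in version_upper:
--             consolidated['NCWO 1-AP'] += count
--         elif 'NCWO2-A' in version_upper or 'NCWO2-PR' in version_upper:
--             consolidated['NCWO 2-A'] += count
--         elif 'NCWO2-AP' in version_upper or 'NCWO2-APPR' in version_upper: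
--             consolidated['NCWO 2-AP'] += count
--
--     return consolidated
-- ===== SOURCE B (Python) =====
-- KEYS = ['CBC2', 'CBC3', 'EXC', 'INACTIVE A-PO', 'INACTIVE A-PU',
--         'INACTIVE AT-PO', 'INACTIVE AT-PU', 'NCWO 1-A', 'NCWO 1-AP',
--         'NCWO 2-A', 'NCWO 2-AP', 'PREPIF']
--
-- def bucket(u):
--     """Classify one uppercased version string to its group key (or None)."""
--     if u.startswith('RAC2404-DM07'): return 'CBC2'
--     if u.startswith('RAC2401-DM03'): return 'CBC3'
--     if 'RACXW' in u: return 'EXC'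
--     if 'PPIF' in u: return 'PREPIF'
--     if '-A-PO' in u or '-PR-PO' in u: return 'INACTIVE A-PO'
--     if '-A-PU' in u or '-PR-PU' in u: return 'INACTIVE A-PU'
--     if '-AT-PO' in u: return 'INACTIVE AT-PO'
--     if '-AT-PU' in u: return 'INACTIVE AT-PU'
--     if 'NCWO1-A' in u or 'NCWO1-PR' in u: return 'NCWO 1-A'
--     # The original 'NCWO 1-AP' / 'NCWO 2-AP' tests are unreachable: every string
--     # containing 'NCWO1-AP' (resp. 'NCWO2-AP') already contains 'NCWO1-A' (resp.
--     # 'NCWO2-A') and is classified above, so those branches are dropped.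
--     if 'NCWO2-A' in u or 'NCWO2-PR' in u: return 'NCWO 2-A'
--     return None
--
-- def consolidate_counts(counts_dict):
--     """Label every version once, then build the result by per-group summation."""
--     labeled = [(bucket(str(v).upper()), c) for v, c in counts_dict.items()]
--     return {k: sum(c for b, c in labeled if b == k) for k in KEYS}
-- ===== Notes on version B (the rewrite author's own statement) =====
-- stated objective: simpler
-- what changed: Instead of A's single pass that mutates a dict through a 12-branch elif ladder, B labels every version once with a pure 10-branch classifier (dropping A's two provably unreachable 'NCWO *-AP' branches, whose patterns contain the patterns tested just before them) and then builds the result dict by one summation per group key (staged passes, no mutation).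
import Mathlib
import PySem

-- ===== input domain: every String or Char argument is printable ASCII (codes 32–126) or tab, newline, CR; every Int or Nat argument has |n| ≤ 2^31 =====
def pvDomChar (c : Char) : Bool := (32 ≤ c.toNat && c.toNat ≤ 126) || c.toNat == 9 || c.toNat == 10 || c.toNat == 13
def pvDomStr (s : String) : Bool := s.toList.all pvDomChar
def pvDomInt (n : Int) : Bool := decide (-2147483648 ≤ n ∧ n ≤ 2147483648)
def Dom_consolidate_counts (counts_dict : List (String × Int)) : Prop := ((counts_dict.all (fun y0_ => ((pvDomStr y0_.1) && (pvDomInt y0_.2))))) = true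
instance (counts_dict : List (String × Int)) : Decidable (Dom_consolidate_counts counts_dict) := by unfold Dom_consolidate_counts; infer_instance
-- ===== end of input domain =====

-- B replaces A's single mutating pass through a 12-branch elif ladder by a pure
-- classifier (with A's two unreachable 'NCWO *-AP' branches removed) followed by
-- one summation per group key; objective: simpler.

-- ===== PORT A =====
-- A's initial consolidated dict, built key by key in A's order
def ccInitA : PySem.Dict String Int :=
  ((((((((((((PySem.Dict.empty.insert "CBC2" 0).insert "CBC3" 0).insert "EXC" 0).insert
    "INACTIVE A-PO" 0).insert "INACTIVE A-PU" 0).insert "INACTIVE AT-PO" 0).insert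
    "INACTIVE AT-PU" 0).insert "NCWO 1-A" 0).insert "NCWO 1-AP" 0).insert
    "NCWO 2-A" 0).insert "NCWO 2-AP" 0).insert "PREPIF" 0)

-- the body of A's for-loop (the if/elif ladder), transcribed branch for branch
def ccStepA (d : PySem.Dict String Int) (p : String × Int) : PySem.Dict String Int :=
  let u := PySem.Str.upper p.1
  let c := p.2
  if PySem.Str.startswith u "RAC2404-DM07" then d.modify "CBC2" 0 (· + c)
  else if PySem.Str.startswith u "RAC2401-DM03" then d.modify "CBC3" 0 (· + c)
  else if PySem.Str.isIn "RACXW" u then d.modify "EXC" 0 (· + c)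
  else if PySem.Str.isIn "PPIF" u then d.modify "PREPIF" 0 (· + c)
  else if PySem.Str.isIn "-A-PO" u || PySem.Str.isIn "-PR-PO" u then d.modify "INACTIVE A-PO" 0 (· + c)
  else if PySem.Str.isIn "-A-PU" u || PySem.Str.isIn "-PR-PU" u then d.modify "INACTIVE A-PU" 0 (· + c)
  else if PySem.Str.isIn "-AT-PO" u then d.modify "INACTIVE AT-PO" 0 (· + c)
  else if PySem.Str.isIn "-AT-PU" u then d.modify "INACTIVE AT-PU" 0 (· + c)
  else if PySem.Str.isIn "NCWO1-A" u || PySem.Str.isIn "NCWO1-PR" u then d.modify "NCWO 1-A" 0 (· + c)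
  else if PySem.Str.isIn "NCWO1-AP" u || PySem.Str.isIn "NCWO1-APPR" u then d.modify "NCWO 1-AP" 0 (· + c)
  else if PySem.Str.isIn "NCWO2-A" u || PySem.Str.isIn "NCWO2-PR" u then d.modify "NCWO 2-A" 0 (· + c)
  else if PySem.Str.isIn "NCWO2-AP" u || PySem.Str.isIn "NCWO2-APPR" u then d.modify "NCWO 2-AP" 0 (· + c)
  else d

def consolidate_counts (counts_dict : List (String × Int)) : List (String × Int) :=
  (counts_dict.foldl ccStepA ccInitA).items

-- ===== PORT B =====
def ccKeys : List String :=
  ["CBC2", "CBC3", "EXC", "INACTIVE A-PO", "INACTIVE A-PU", "INACTIVE AT-PO",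
   "INACTIVE AT-PU", "NCWO 1-A", "NCWO 1-AP", "NCWO 2-A", "NCWO 2-AP", "PREPIF"]

-- Source B's bucket(): pure classifier of one uppercased version string
def ccBucket (u : String) : Option String :=
  if PySem.Str.startswith u "RAC2404-DM07" then some "CBC2"
  else if PySem.Str.startswith u "RAC2401-DM03" then some "CBC3"
  else if PySem.Str.isIn "RACXW" u then some "EXC"
  else if PySem.Str.isIn "PPIF" u then some "PREPIF"
  else if PySem.Str.isIn "-A-PO" u || PySem.Str.isIn "-PR-PO" u then some "INACTIVE A-PO"
  else if PySem.Str.isIn "-A-PU" u || PySem.Str.isIn "-PR-PU" u then some "INACTIVE A-PU"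
  else if PySem.Str.isIn "-AT-PO" u then some "INACTIVE AT-PO"
  else if PySem.Str.isIn "-AT-PU" u then some "INACTIVE AT-PU"
  else if PySem.Str.isIn "NCWO1-A" u || PySem.Str.isIn "NCWO1-PR" u then some "NCWO 1-A"
  else if PySem.Str.isIn "NCWO2-A" u || PySem.Str.isIn "NCWO2-PR" u then some "NCWO 2-A"
  else none

def consolidate_counts_alt (counts_dict : List (String × Int)) : List (String × Int) :=
  let labeled := counts_dict.map (fun p => (ccBucket (PySem.Str.upper p.1), p.2))
  ccKeys.map (fun k => (k, ((labeled.filter (fun q => q.1 == some k)).map Prod.snd).sum))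

-- ===== PRECONDITION & SPEC =====
def Spec_consolidate_counts (counts_dict : List (String × Int)) (out : List (String × Int)) : Prop := out = consolidate_counts_alt counts_dict
instance (counts_dict : List (String × Int)) (out : List (String × Int)) : Decidable (Spec_consolidate_counts counts_dict out) := by unfold Spec_consolidate_counts; infer_instance

-- ===== CLAIM (what is proved, stated in full; the proofs are below) =====
def Claim_equal_consolidate_counts : Prop := ∀ (counts_dict : List (String × Int)), Dom_consolidate_counts counts_dict → Spec_consolidate_counts counts_dict (consolidate_counts counts_dict)

-- ===== LEMMAS AND PROOFS =====
-- A's loop body expressed through B's classifier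
def ccStep' (d : PySem.Dict String Int) (p : String × Int) : PySem.Dict String Int :=
  match ccBucket (PySem.Str.upper p.1) with
  | some k => d.modify k 0 (· + p.2)
  | none => d

theorem ccIsIn_mono {s t : String} (h : s.toList <+: t.toList) (u : String)
    (ht : PySem.Str.isIn t u = true) : PySem.Str.isIn s u = true := by
  rw [PySem.Str.isIn_iff_infix] at *
  exact h.isInfix.trans ht

set_option maxHeartbeats 800000 in
theorem ccStepA_eq (d : PySem.Dict String Int) (p : String × Int) :
    ccStepA d p = ccStep' d p := by
  have h1 := ccIsIn_mono (s := "NCWO1-A") (t := "NCWO1-AP") (by decide) (PySem.Str.upper p.1)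
  have h2 := ccIsIn_mono (s := "NCWO1-A") (t := "NCWO1-APPR") (by decide) (PySem.Str.upper p.1)
  have h3 := ccIsIn_mono (s := "NCWO2-A") (t := "NCWO2-AP") (by decide) (PySem.Str.upper p.1)
  have h4 := ccIsIn_mono (s := "NCWO2-A") (t := "NCWO2-APPR") (by decide) (PySem.Str.upper p.1)
  simp only [ccStepA, ccStep', ccBucket]
  generalize PySem.Str.startswith (PySem.Str.upper p.1) "RAC2404-DM07" = b1
  generalize PySem.Str.startswith (PySem.Str.upper p.1) "RAC2401-DM03" = b2
  generalize PySem.Str.isIn "RACXW" (PySem.Str.upper p.1) = b3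
  generalize PySem.Str.isIn "PPIF" (PySem.Str.upper p.1) = b4
  generalize PySem.Str.isIn "-A-PO" (PySem.Str.upper p.1) = b5
  generalize PySem.Str.isIn "-PR-PO" (PySem.Str.upper p.1) = b6
  generalize PySem.Str.isIn "-A-PU" (PySem.Str.upper p.1) = b7
  generalize PySem.Str.isIn "-PR-PU" (PySem.Str.upper p.1) = b8
  generalize PySem.Str.isIn "-AT-PO" (PySem.Str.upper p.1) = b9
  generalize PySem.Str.isIn "-AT-PU" (PySem.Str.upper p.1) = b10
  generalize hgb11 : PySem.Str.isIn "NCWO1-A" (PySem.Str.upper p.1) = b11 at h1 h2 ⊢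
  generalize PySem.Str.isIn "NCWO1-PR" (PySem.Str.upper p.1) = b12
  generalize hgb13 : PySem.Str.isIn "NCWO1-AP" (PySem.Str.upper p.1) = b13 at h1 ⊢
  generalize hgb14 : PySem.Str.isIn "NCWO1-APPR" (PySem.Str.upper p.1) = b14 at h2 ⊢
  generalize hgb15 : PySem.Str.isIn "NCWO2-A" (PySem.Str.upper p.1) = b15 at h3 h4 ⊢
  generalize PySem.Str.isIn "NCWO2-PR" (PySem.Str.upper p.1) = b16
  generalize hgb17 : PySem.Str.isIn "NCWO2-AP" (PySem.Str.upper p.1) = b17 at h3 ⊢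
  generalize hgb18 : PySem.Str.isIn "NCWO2-APPR" (PySem.Str.upper p.1) = b18 at h4 ⊢
  cases b1 with
  | true => rfl
  | false =>
    cases b2 with
    | true => rfl
    | false =>
      cases b3 with
      | true => rfl
      | false =>
        cases b4 with
        | true => rfl
        | false =>
          cases b5 with
          | true => rfl
          | false =>
            cases b6 with
            | true => rfl
            | false =>
              cases b7 with
              | true => rfl
              | false =>
                cases b8 with
                | true => rfl
                | false =>
                  cases b9 with
                  | true => rfl
                  | false =>
                    cases b10 with
                    | true => rfl
                    | false =>
                      cases b11 with
                      | true => rfl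
                      | false =>
                        cases b12 with
                        | true => rfl
                        | false =>
                          cases b13 with
                          | true => exact absurd (h1 rfl) (by decide)
                          | false =>
                            cases b14 with
                            | true => exact absurd (h2 rfl) (by decide)
                            | false =>
                              cases b15 with
                              | true => rfl
                              | false =>
                                cases b16 with
                                | true => rfl
                                | false =>
                                  cases b17 with
                                  | true => exact absurd (h3 rfl) (by decide)
                                  | false =>
                                    cases b18 with
                                    | true => exact absurd (h4 rfl) (by decide)
                                    | false =>
                                      rfl

theorem ccBucket_mem (u k : String) (h : ccBucket u = some k) : k ∈ ccKeys := by
  unfold ccBucket at h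
  split_ifs at h <;> first | exact Option.noConfusion h | (injection h with h; subst h; decide)

theorem ccFold_keys (l : List (String × Int)) (d : PySem.Dict String Int)
    (H : ∀ k ∈ ccKeys, d.contains k = true) :
    (l.foldl ccStep' d).keys = d.keys := by
  induction l generalizing d with
  | nil => rfl
  | cons p l ih =>
    have hstep : (ccStep' d p).keys = d.keys ∧ ∀ k ∈ ccKeys, (ccStep' d p).contains k = true := by
      unfold ccStep'
      cases hb : ccBucket (PySem.Str.upper p.1) with
      | none => exact ⟨rfl, H⟩
      | some k =>
        constructor
        · rw [PySem.Dict.keys_modify,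
            PySem.Dict.keys_insert_of_contains _ _ (H k (ccBucket_mem _ _ hb))]
        · intro k' hk'
          rw [PySem.Dict.contains_modify]
          simp [H k' hk']
    rw [List.foldl_cons, ih _ hstep.2, hstep.1]

theorem ccFold_getD (l : List (String × Int)) (d : PySem.Dict String Int) (k0 : String) :
    (l.foldl ccStep' d).getD k0 0 = d.getD k0 0 +
      (((l.map (fun p => (ccBucket (PySem.Str.upper p.1), p.2))).filter
        (fun q => q.1 == some k0)).map Prod.snd).sum := by
  induction l generalizing d with
  | nil => simp
  | cons p l ih =>
    simp only [List.foldl_cons, List.map_cons, List.filter_cons]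
    rw [ih]
    cases hb : ccBucket (PySem.Str.upper p.1) with
    | none => simp [ccStep', hb]
    | some k =>
      by_cases hk : k = k0
      · subst hk
        simp only [ccStep', hb]
        rw [PySem.Dict.getD_modify_self]
        simp
        omega
      · simp only [ccStep', hb]
        rw [PySem.Dict.getD_modify_of_ne _ _ _ (fun h => hk h.symm)]
        simp [hk]

-- ===== VERDICT (by name: the statement is the Claim_ definition above) =====
theorem consolidate_counts_spec : Claim_equal_consolidate_counts := by
  intro l _
  show _ = _
  have hcont : ∀ k ∈ ccKeys, ccInitA.contains k = true := by decide
  have hkeys : (l.foldl ccStep' ccInitA).keys = ccKeys := by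
    rw [ccFold_keys _ _ hcont]; decide
  have hfun : ccStepA = ccStep' := funext fun d => funext fun p => ccStepA_eq d p
  simp only [consolidate_counts, consolidate_counts_alt, hfun]
  rw [PySem.Dict.items_eq_map_keys _ (by rw [hkeys]; decide) 0, hkeys]
  refine List.map_congr_left (fun k hk => ?_)
  rw [ccFold_getD]
  have h0 : ccInitA.getD k 0 = 0 := by
    revert hk; revert k; decide
  rw [h0, zero_add]
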